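-- pv_equiv track=rewrite | github.com/danwinkler/cad | src/cad/common/tests/test_pyconvsurf.py | is_geometry_water_tight
-- ===== SOURCE A (Python) =====
-- def is_geometry_water_tight(vertices, triangles):
--     """
--     Checks if the geometry is watertight by ensuring every edge is shared by exactly two triangles.
--     """
--     edge_count = {}
--     for tri in triangles:
--         edges = [(tri[0], tri[1]), (tri[1], tri[2]), (tri[2], tri[0])]
--         for edge in edges:
--             sorted_edge = tuple(sorted(edge))
--             if sorted_edge in edge_count:
--                 edge_count[sorted_edge] += 1
--             else:
--                 edge_count[sorted_edge] = 1
--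
--     # A watertight mesh should have all edges shared exactly twice
--     return all(count == 2 for count in edge_count.values())
-- ===== SOURCE B (Python) =====
-- def is_geometry_water_tight(vertices, triangles):
--     """
--     Watertight check by sort-then-group: collect every canonical edge,
--     sort them, then verify each run of equal edges has length exactly 2.
--     """
--     edges = []
--     for a, b, c in triangles:
--         for u, v in ((a, b), (b, c), (c, a)):
--             edges.append((u, v) if u <= v else (v, u))
--     edges.sort()
--     i, n = 0, len(edges)
--     while i < n:
--         j = i
--         while j < n and edges[j] == edges[i]:
--             j += 1
--         if j - i != 2:
--             return False
--         i = j
--     return True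
-- ===== Notes on version B (the rewrite author's own statement) =====
-- stated objective: alternative
-- what changed: Replaced A's hash-map edge counting plus a final all-counts-equal-2 pass by building the flat list of canonical edges, sorting it lexicographically, and checking in one scan that every run of equal edges has length exactly 2.
import Mathlib
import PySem

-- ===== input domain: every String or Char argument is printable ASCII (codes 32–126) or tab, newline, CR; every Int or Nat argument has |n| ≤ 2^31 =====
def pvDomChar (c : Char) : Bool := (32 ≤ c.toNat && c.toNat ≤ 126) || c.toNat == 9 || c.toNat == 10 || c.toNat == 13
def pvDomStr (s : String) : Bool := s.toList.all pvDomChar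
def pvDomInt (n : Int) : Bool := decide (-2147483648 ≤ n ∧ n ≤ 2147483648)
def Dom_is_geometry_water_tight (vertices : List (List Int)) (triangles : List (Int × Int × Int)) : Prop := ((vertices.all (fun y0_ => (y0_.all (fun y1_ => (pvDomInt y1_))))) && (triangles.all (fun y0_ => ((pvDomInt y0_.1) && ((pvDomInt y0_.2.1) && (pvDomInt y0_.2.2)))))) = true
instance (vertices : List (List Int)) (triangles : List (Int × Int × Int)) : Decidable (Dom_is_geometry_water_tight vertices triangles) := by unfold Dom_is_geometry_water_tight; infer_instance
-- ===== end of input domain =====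

-- B replaces A's hash-map edge counting by a sort-then-group pass: flatten the canonical edges, sort lexicographically, check every run of equal edges has length 2 (alternative decomposition, same result).


-- ===== PORT A =====
-- Literal port of A: a dict counts each canonical edge, then all(count == 2) over the values.
-- tuple(sorted((u, v))) on a 2-tuple is (u, v) if u ≤ v else (v, u) (exact);
-- edge_count[e] += 1 is insert e (getD e 0 + 1) on a contained key (exact overwrite-in-place).
def is_geometry_water_tight (vertices : List (List Int)) (triangles : List (Int × Int × Int)) : Bool :=
  let edge_count : PySem.Dict (Int × Int) Int :=
    triangles.foldl (fun edge_count tri =>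
      let edges := [(tri.1, tri.2.1), (tri.2.1, tri.2.2), (tri.2.2, tri.1)]
      edges.foldl (fun edge_count edge =>
        let sorted_edge := if edge.1 ≤ edge.2 then (edge.1, edge.2) else (edge.2, edge.1)
        if edge_count.contains sorted_edge then
          edge_count.insert sorted_edge (edge_count.getD sorted_edge 0 + 1)
        else
          edge_count.insert sorted_edge 1) edge_count) PySem.Dict.empty
  edge_count.values.all (fun count => count == 2)

-- ===== PORT B =====
-- Source B's nested for loops appending each canonical edge to `edges`
def pvEdgesB (triangles : List (Int × Int × Int)) : List (Int × Int) :=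
  triangles.foldl (fun edges tri =>
    [(tri.1, tri.2.1), (tri.2.1, tri.2.2), (tri.2.2, tri.1)].foldl
      (fun edges uv => edges ++ [if uv.1 ≤ uv.2 then (uv.1, uv.2) else (uv.2, uv.1)]) edges) []

-- Source B's outer while loop over the sorted list; the inner `while edges[j] == edges[i]` scan is
-- takeWhile/dropWhile of the tail, j - i is 1 + run.length, `return False` on a run ≠ 2
def pvScanRuns : List (Int × Int) → Bool
  | [] => true
  | x :: rest =>
      let run := rest.takeWhile (fun y => y == x)
      if 1 + run.length ≠ 2 then false
      else pvScanRuns (rest.dropWhile (fun y => y == x))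
termination_by l => l.length
decreasing_by simpa using Nat.lt_succ_of_le (List.length_dropWhile_le _ rest)

-- edges.sort() on int pairs is the lexicographic tuple sort = PySem.List.sorted2 with keys fst, snd
def is_geometry_water_tight_alt (vertices : List (List Int)) (triangles : List (Int × Int × Int)) : Bool :=
  pvScanRuns (PySem.List.sorted2 (pvEdgesB triangles) Prod.fst Prod.snd)

-- ===== PRECONDITION & SPEC =====
def Spec_is_geometry_water_tight (vertices : List (List Int)) (triangles : List (Int × Int × Int)) (out : Bool) : Prop := out = is_geometry_water_tight_alt vertices triangles
instance (vertices : List (List Int)) (triangles : List (Int × Int × Int)) (out : Bool) : Decidable (Spec_is_geometry_water_tight vertices triangles out) := by unfold Spec_is_geometry_water_tight; infer_instance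

-- ===== CLAIM (what is proved, stated in full; the proofs are below) =====
def Claim_equal_is_geometry_water_tight : Prop := ∀ (vertices : List (List Int)) (triangles : List (Int × Int × Int)), Dom_is_geometry_water_tight vertices triangles → Spec_is_geometry_water_tight vertices triangles (is_geometry_water_tight vertices triangles)

-- ===== LEMMAS AND PROOFS =====

-- the canonical edge multiset both ports process
def pvE (triangles : List (Int × Int × Int)) : List (Int × Int) :=
  triangles.flatMap (fun tri =>
    [(tri.1, tri.2.1), (tri.2.1, tri.2.2), (tri.2.2, tri.1)].map
      (fun uv => if uv.1 ≤ uv.2 then (uv.1, uv.2) else (uv.2, uv.1)))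

def pvLexLe (a b : Int × Int) : Prop := a.1 < b.1 ∨ (a.1 = b.1 ∧ a.2 ≤ b.2)

def pvBf (a b : Int × Int) : Bool := decide (a.1 < b.1) || (!decide (b.1 < a.1) && decide (a.2 < b.2))

lemma pv_bf_true {a b : Int × Int} (h : pvBf a b = true) : pvLexLe a b := by
  simp only [pvBf, Bool.or_eq_true, Bool.and_eq_true, Bool.not_eq_true', decide_eq_true_eq,
    decide_eq_false_iff_not] at h
  unfold pvLexLe; omega

lemma pv_bf_false {a b : Int × Int} (h : pvBf a b = false) : pvLexLe b a := by
  simp only [pvBf, Bool.or_eq_false_iff, Bool.and_eq_false_iff, Bool.not_eq_false',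
    decide_eq_true_eq, decide_eq_false_iff_not] at h
  unfold pvLexLe; omega

lemma pv_lex_trans {a b c : Int × Int} (h1 : pvLexLe a b) (h2 : pvLexLe b c) : pvLexLe a c := by
  unfold pvLexLe at *; omega

lemma pv_lex_antisymm {a b : Int × Int} (h1 : pvLexLe a b) (h2 : pvLexLe b a) : a = b := by
  unfold pvLexLe at *
  obtain ⟨a1, a2⟩ := a; obtain ⟨b1, b2⟩ := b
  simp_all only [Prod.mk.injEq]
  omega

lemma pv_insertBy_perm (x : Int × Int) (ys : List (Int × Int)) :
    (PySem.List.insertBy pvBf x ys).Perm (x :: ys) := by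
  induction ys with
  | nil => simp [PySem.List.insertBy]
  | cons y ys ih =>
    simp only [PySem.List.insertBy]
    split
    · exact List.Perm.refl _
    · exact (ih.cons y).trans (List.Perm.swap x y ys)

lemma pv_foldl_insertBy_perm (xs : List (Int × Int)) :
    ∀ acc, (xs.foldl (fun acc x => PySem.List.insertBy pvBf x acc) acc).Perm (acc ++ xs) := by
  induction xs with
  | nil => intro acc; simp
  | cons x xs ih =>
    intro acc
    simp only [List.foldl_cons]
    refine ((ih _).trans ?_)
    refine (((pv_insertBy_perm x acc).append_right xs).trans ?_)
    simpa using List.perm_middle.symm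

lemma pv_sorted2_perm (xs : List (Int × Int)) :
    (PySem.List.sorted2 xs Prod.fst Prod.snd).Perm xs := by
  have h : PySem.List.sorted2 xs Prod.fst Prod.snd =
      xs.foldl (fun acc x => PySem.List.insertBy pvBf x acc) [] := rfl
  rw [h]
  simpa using pv_foldl_insertBy_perm xs []

lemma pv_insertBy_pairwise (x : Int × Int) (ys : List (Int × Int)) (h : ys.Pairwise pvLexLe) :
    (PySem.List.insertBy pvBf x ys).Pairwise pvLexLe := by
  induction ys with
  | nil => simp [PySem.List.insertBy]
  | cons y ys ih =>
    rw [List.pairwise_cons] at h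
    simp only [PySem.List.insertBy]
    split
    · rename_i hb
      refine List.pairwise_cons.2 ⟨?_, List.pairwise_cons.2 ⟨h.1, h.2⟩⟩
      intro z hz
      rcases List.mem_cons.1 hz with rfl | hz
      · exact pv_bf_true hb
      · exact pv_lex_trans (pv_bf_true hb) (h.1 z hz)
    · rename_i hb
      refine List.pairwise_cons.2 ⟨?_, ih h.2⟩
      intro z hz
      rcases (PySem.List.mem_insertBy _ _ _ _).1 hz with rfl | hz
      · exact pv_bf_false (Bool.not_eq_true _ ▸ by simpa using hb)
      · exact h.1 z hz

lemma pv_sorted2_pairwise (xs : List (Int × Int)) :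
    (PySem.List.sorted2 xs Prod.fst Prod.snd).Pairwise pvLexLe := by
  have h : PySem.List.sorted2 xs Prod.fst Prod.snd =
      xs.foldl (fun acc x => PySem.List.insertBy pvBf x acc) [] := rfl
  rw [h]
  have main : ∀ (l : List (Int × Int)) (acc : List (Int × Int)), acc.Pairwise pvLexLe →
      (l.foldl (fun acc x => PySem.List.insertBy pvBf x acc) acc).Pairwise pvLexLe := by
    intro l
    induction l with
    | nil => intro acc h; simpa using h
    | cons x xs ih => intro acc h; exact ih _ (pv_insertBy_pairwise x acc h)
  exact main xs [] (by simp)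

lemma pv_count_run (x : Int × Int) (rest : List (Int × Int)) (hpw : rest.Pairwise pvLexLe)
    (hx : ∀ z ∈ rest, pvLexLe x z) :
    rest.count x = (rest.takeWhile (fun y => y == x)).length ∧
      x ∉ rest.dropWhile (fun y => y == x) := by
  induction rest with
  | nil => simp
  | cons y r ih =>
    by_cases hy : y = x
    · subst hy
      rw [List.pairwise_cons] at hpw
      have ihr := ih hpw.2 (fun z hz => hx z (List.mem_cons_of_mem _ hz))
      simp only [List.takeWhile_cons, List.dropWhile_cons, BEq.rfl, if_true, List.length_cons,
        List.count_cons_self]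
      exact ⟨by omega, ihr.2⟩
    · have hne : x ∉ y :: r := by
        intro hmem
        rcases List.mem_cons.1 hmem with rfl | hmem
        · exact hy rfl
        · rw [List.pairwise_cons] at hpw
          exact hy (pv_lex_antisymm (hpw.1 x hmem) (hx y (List.mem_cons_self)))
      have hb : (y == x) = false := by simpa using fun h => hy h
      simp only [List.takeWhile_cons, List.dropWhile_cons, hb, Bool.false_eq_true, if_false,
        List.length_nil]
      exact ⟨List.count_eq_zero.2 hne, hne⟩

lemma pvScanRuns_cons (x : Int × Int) (rest : List (Int × Int)) :
    pvScanRuns (x :: rest) =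
      if (rest.takeWhile (fun y => y == x)).length = 1 then
        pvScanRuns (rest.dropWhile (fun y => y == x)) else false := by
  rw [pvScanRuns]
  split <;> split <;> first | rfl | omega

lemma pv_scan_iff (s : List (Int × Int)) :
    s.Pairwise pvLexLe → (pvScanRuns s = true ↔ ∀ x ∈ s, s.count x = 2) := by
  induction s using pvScanRuns.induct with
  | case1 => intro _; simp [pvScanRuns]
  | case2 x rest run hcond =>
    intro hs
    rw [List.pairwise_cons] at hs
    have hcr := pv_count_run x rest hs.2 hs.1
    have hlen : (rest.takeWhile (fun y => y == x)).length ≠ 1 := by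
      have h2 : run.length ≠ 1 := by omega
      exact h2
    rw [pvScanRuns_cons, if_neg hlen]
    simp only [Bool.false_eq_true, false_iff]
    intro hall
    have := hall x List.mem_cons_self
    rw [List.count_cons_self, hcr.1] at this
    omega
  | case3 x rest run hcond ih =>
    intro hs
    rw [List.pairwise_cons] at hs
    have hcr := pv_count_run x rest hs.2 hs.1
    have hlen : (rest.takeWhile (fun y => y == x)).length = 1 := by
      have h2 : run.length = 1 := by omega
      exact h2
    set t := rest.takeWhile (fun y => y == x) with ht
    set d := rest.dropWhile (fun y => y == x) with hd
    have hrest : t ++ d = rest := List.takeWhile_append_dropWhile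
    have htx : ∀ y ∈ t, y = x := fun y hy => by simpa using List.mem_takeWhile_imp hy
    have hdpw : d.Pairwise pvLexLe := List.Pairwise.sublist (List.dropWhile_sublist _) hs.2
    have hxd : x ∉ d := hcr.2
    have hcount_d : ∀ y ∈ d, (x :: rest).count y = d.count y := by
      intro y hyd
      have hyx : x ≠ y := fun h => hxd (h ▸ hyd)
      have hyt : y ∉ t := fun h => hyx ((htx y h).symm)
      rw [List.count_cons_of_ne hyx, ← hrest, List.count_append, List.count_eq_zero.2 hyt]
      omega
    rw [pvScanRuns_cons, if_pos hlen, ih hdpw]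
    constructor
    · intro h y hy
      rcases List.mem_cons.1 hy with rfl | hy
      · rw [List.count_cons_self, hcr.1, hlen]
      rcases List.mem_append.1 (hrest ▸ hy) with hyt | hyd
      · rw [htx y hyt, List.count_cons_self, hcr.1, hlen]
      · rw [hcount_d y hyd]; exact h y hyd
    · intro h y hyd
      rw [← hcount_d y hyd]
      exact h y (List.mem_cons_of_mem _ ((hrest ▸ List.mem_append_right t hyd)))

lemma pvEdgesB_eq (triangles : List (Int × Int × Int)) : pvEdgesB triangles = pvE triangles := by
  have main : ∀ (ts : List (Int × Int × Int)) (acc : List (Int × Int)),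
      ts.foldl (fun edges tri =>
        [(tri.1, tri.2.1), (tri.2.1, tri.2.2), (tri.2.2, tri.1)].foldl
          (fun edges uv => edges ++ [if uv.1 ≤ uv.2 then (uv.1, uv.2) else (uv.2, uv.1)]) edges) acc
        = acc ++ pvE ts := by
    intro ts
    induction ts with
    | nil => intro acc; simp [pvE]
    | cons t ts ih =>
      intro acc
      rw [List.foldl_cons, ih]
      simp [pvE, List.foldl_cons, List.foldl_nil]
  unfold pvEdgesB
  rw [main triangles []]
  simp

lemma pvA_dict (triangles : List (Int × Int × Int)) :
    triangles.foldl (fun edge_count tri =>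
      [(tri.1, tri.2.1), (tri.2.1, tri.2.2), (tri.2.2, tri.1)].foldl
        (fun (edge_count : PySem.Dict (Int × Int) Int) edge =>
          let sorted_edge := if edge.1 ≤ edge.2 then (edge.1, edge.2) else (edge.2, edge.1)
          if edge_count.contains sorted_edge then
            edge_count.insert sorted_edge (edge_count.getD sorted_edge 0 + 1)
          else edge_count.insert sorted_edge 1) edge_count) PySem.Dict.empty
    = PySem.Dict.counter (pvE triangles) := by
  rw [← PySem.Dict.foldl_insert_getD_add_one_eq_counter]
  unfold pvE
  rw [List.foldl_flatMap]
  congr 1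
  funext d tri
  rw [List.foldl_map]
  congr 1
  funext d e
  by_cases h : d.contains (if e.1 ≤ e.2 then (e.1, e.2) else (e.2, e.1)) = true
  · simp only [h, if_true]
  · simp only [Bool.not_eq_true] at h
    simp only [h, Bool.false_eq_true, if_false,
      PySem.Dict.getD_of_not_contains _ _ h, zero_add]

lemma pvA_eq (vertices : List (List Int)) (triangles : List (Int × Int × Int)) :
    is_geometry_water_tight vertices triangles =
      (PySem.Dict.counter (pvE triangles)).values.all (fun count => count == 2) := by
  unfold is_geometry_water_tight
  rw [pvA_dict]
lemma pvA_iff (vertices : List (List Int)) (triangles : List (Int × Int × Int)) :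
    is_geometry_water_tight vertices triangles = true ↔
      ∀ x ∈ pvE triangles, (pvE triangles).count x = 2 := by
  rw [pvA_eq]
  rw [PySem.Dict.values_eq_map_keys _ (PySem.Dict.nodup_keys_counter _) 0,
    PySem.Dict.keys_counter]
  simp only [List.all_eq_true, List.mem_map, beq_iff_eq]
  constructor
  · intro h x hx
    have := h _ ⟨x, (PySem.Set.mem_ofList _ _).2 hx, rfl⟩
    rw [PySem.Dict.getD_counter] at this
    exact_mod_cast this
  · rintro h v ⟨x, hx, rfl⟩
    rw [PySem.Dict.getD_counter]
    exact_mod_cast h x ((PySem.Set.mem_ofList _ _).1 hx)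

lemma pvB_iff (vertices : List (List Int)) (triangles : List (Int × Int × Int)) :
    is_geometry_water_tight_alt vertices triangles = true ↔
      ∀ x ∈ pvE triangles, (pvE triangles).count x = 2 := by
  unfold is_geometry_water_tight_alt
  rw [pvEdgesB_eq, pv_scan_iff _ (pv_sorted2_pairwise _)]
  have hp := pv_sorted2_perm (pvE triangles)
  constructor
  · intro h x hx
    rw [← hp.count_eq x]
    exact h x (hp.mem_iff.2 hx)
  · intro h x hx
    rw [hp.count_eq x]
    exact h x (hp.mem_iff.1 hx)

-- ===== VERDICT (by name: the statement is the Claim_ definition above) =====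
theorem is_geometry_water_tight_spec : Claim_equal_is_geometry_water_tight := by
  intro vertices triangles _
  unfold Spec_is_geometry_water_tight
  rw [Bool.eq_iff_iff, pvA_iff, pvB_iff]
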